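-- pv_equiv track=rewrite | github.com/tmckayus/cuopt-examples | benchmark_apis/analyze_benchmark_results.py | discover_solvers
-- ===== SOURCE A (Python) =====
-- from typing import Dict, List, Optional, Tuple
--
-- def discover_solvers(headers: List[str]) -> List[str]:
--     """
--     Discover solver names from CSV headers by looking for *_objective and *_total_time patterns.
--
--     Args:
--         headers: List of CSV column headers
--
--     Returns:
--         List of solver names found
--     """
--     solvers = set()
--
--     for header in headers:
--         if header.endswith('_objective'):
--             solver_name = header[:-10]  # Remove '_objective'
--             # Check if total_time column exists (minimum requirement)
--             if f"{solver_name}_process_total_time" in headers: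
--                 solvers.add(solver_name)
--
--     return sorted(list(solvers))
-- ===== SOURCE B (Python) =====
-- def discover_solvers(headers):
--     """Single pass: index each header by its stripped solver name with a pair of
--     flags (saw _objective, saw _process_total_time); keep names with both."""
--     status = {}
--     for h in headers:
--         if h.endswith('_objective'):
--             name = h[:-10]
--             obj, tot = status.get(name, (False, False))
--             status[name] = (True, tot)
--         elif h.endswith('_process_total_time'):
--             name = h[:-19]
--             obj, tot = status.get(name, (False, False))
--             status[name] = (obj, True)
--     return sorted(n for n, (obj, tot) in status.items() if obj and tot)
-- ===== Notes on version B (the rewrite author's own statement) =====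
-- stated objective: alternative
-- what changed: A rescans the whole headers list for the matching '_process_total_time' column inside its loop and collects a set; B makes a single pass that builds one dict keyed by stripped solver name holding a pair of seen-suffix flags, then keeps the names whose both flags are set - no inner scan and no separate set.
import Mathlib
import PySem

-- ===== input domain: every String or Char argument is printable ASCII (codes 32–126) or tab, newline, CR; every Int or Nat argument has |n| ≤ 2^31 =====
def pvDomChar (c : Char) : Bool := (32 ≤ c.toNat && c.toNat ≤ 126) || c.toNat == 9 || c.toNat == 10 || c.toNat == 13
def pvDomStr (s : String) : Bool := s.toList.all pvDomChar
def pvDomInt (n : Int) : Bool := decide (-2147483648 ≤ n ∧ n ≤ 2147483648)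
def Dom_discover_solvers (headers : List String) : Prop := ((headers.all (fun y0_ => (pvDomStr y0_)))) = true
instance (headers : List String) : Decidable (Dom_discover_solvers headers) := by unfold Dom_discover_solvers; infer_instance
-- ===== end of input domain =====

-- B replaces A's loop with its per-header rescan of `headers` by ONE pass that indexes each
-- header under its stripped solver name with a pair of seen-suffix flags, then keeps the
-- names with both flags set; same return value, no inner scan (alternative algorithm).

-- ===== PORT A =====
def discover_solvers (headers : List String) : List String :=
  let solvers : PySem.Set String :=
    headers.foldl (fun s header =>
      if PySem.Str.endswith header "_objective" then
        let solver_name := PySem.Str.slice header none (some (-10))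
        if (solver_name ++ "_process_total_time") ∈ headers then
          PySem.Set.add s solver_name
        else s
      else s) PySem.Set.empty
  PySem.List.sorted solvers (fun x => x) false

-- ===== PORT B =====
def discover_solvers_alt (headers : List String) : List String :=
  let status : PySem.Dict String (Bool × Bool) :=
    headers.foldl (fun d h =>
      if PySem.Str.endswith h "_objective" then
        let name := PySem.Str.slice h none (some (-10))
        let p := d.getD name (false, false)
        d.insert name (true, p.2)
      else if PySem.Str.endswith h "_process_total_time" then
        let name := PySem.Str.slice h none (some (-19))
        let p := d.getD name (false, false)
        d.insert name (p.1, true)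
      else d) PySem.Dict.empty
  PySem.List.sorted
    (((status.items.filter (fun nv => nv.2.1 && nv.2.2)).map (fun nv => nv.1)))
    (fun x => x) false

-- ===== PRECONDITION & SPEC =====
def Spec_discover_solvers (headers : List String) (out : List String) : Prop := out = discover_solvers_alt headers
instance (headers : List String) (out : List String) : Decidable (Spec_discover_solvers headers out) := by unfold Spec_discover_solvers; infer_instance

-- ===== CLAIM (what is proved, stated in full; the proofs are below) =====
def Claim_equal_discover_solvers : Prop := ∀ (headers : List String), Dom_discover_solvers headers → Spec_discover_solvers headers (discover_solvers headers)

-- ===== LEMMAS AND PROOFS =====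

-- stripping the 19-char suffix off `x ++ "_process_total_time"` gives back `x`
theorem strip19_append (x : String) :
    PySem.Str.slice (x ++ "_process_total_time") none (some (-19)) = x := by
  apply String.toList_inj.mp
  rw [PySem.Str.toList_slice, String.toList_append]
  show PySem.List.slice _ none (some (-19)) = _
  rw [PySem.List.slice_to_neg_ofNat _ 19 (by norm_num)]
  simp

theorem endswith_append (x t : String) :
    PySem.Str.endswith (x ++ t) t = true := by
  rw [PySem.Str.endswith_eq, String.toList_append]
  simp [PySem.Chars.endswith, List.isSuffixOf_iff_suffix]

-- a header ending in the 19-char suffix is its stripped name with the suffix appended back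
theorem eq_strip19_append (h : String) (he : PySem.Str.endswith h "_process_total_time" = true) :
    h = PySem.Str.slice h none (some (-19)) ++ "_process_total_time" := by
  rw [PySem.Str.endswith_eq] at he
  have hsuf : ("_process_total_time" : String).toList <:+ h.toList :=
    List.isSuffixOf_iff_suffix.mp he
  obtain ⟨pre, hpre⟩ := hsuf
  have hx : h = String.ofList pre ++ "_process_total_time" := by
    apply String.toList_inj.mp
    rw [String.toList_append, String.toList_ofList, hpre]
  rw [hx, strip19_append]

-- `x ++ "_process_total_time"` never ends with "_objective"
theorem not_endswith_obj (x : String) :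
    PySem.Str.endswith (x ++ "_process_total_time") "_objective" = false := by
  by_contra hne
  have he : PySem.Str.endswith (x ++ "_process_total_time") "_objective" = true := by
    revert hne; cases PySem.Str.endswith (x ++ "_process_total_time") "_objective" <;> simp
  rw [PySem.Str.endswith_eq, String.toList_append] at he
  have h1 : ("_objective" : String).toList <:+ (x.toList ++ ("_process_total_time" : String).toList) :=
    List.isSuffixOf_iff_suffix.mp he
  have h2 : ("_process_total_time" : String).toList <:+ (x.toList ++ ("_process_total_time" : String).toList) :=
    List.suffix_append _ _
  have h3 : ("_objective" : String).toList <:+ ("_process_total_time" : String).toList := by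
    apply List.suffix_of_suffix_length_le h1 h2
    decide
  revert h3
  decide

-- A's loop body, named for the induction
def pvBodyA (headers : List String) (s : PySem.Set String) (header : String) : PySem.Set String :=
  if PySem.Str.endswith header "_objective" then
    if (PySem.Str.slice header none (some (-10)) ++ "_process_total_time") ∈ headers then
      PySem.Set.add s (PySem.Str.slice header none (some (-10)))
    else s
  else s

theorem mem_foldA (headers rest : List String) (acc : PySem.Set String) (x : String) :
    x ∈ rest.foldl (pvBodyA headers) acc ↔
      x ∈ acc ∨ ∃ h ∈ rest, PySem.Str.endswith h "_objective" = true ∧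
        (PySem.Str.slice h none (some (-10)) ++ "_process_total_time") ∈ headers ∧
        x = PySem.Str.slice h none (some (-10)) := by
  induction rest generalizing acc with
  | nil => simp
  | cons h t ih =>
    rw [List.foldl_cons, ih]
    have hb : x ∈ pvBodyA headers acc h ↔
        x ∈ acc ∨ (PySem.Str.endswith h "_objective" = true ∧
          (PySem.Str.slice h none (some (-10)) ++ "_process_total_time") ∈ headers ∧
          x = PySem.Str.slice h none (some (-10))) := by
      unfold pvBodyA
      split_ifs with h1 h2 <;> first
        | (rw [PySem.Set.mem_add]; tauto)
        | tauto
    rw [hb]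
    simp only [List.mem_cons]
    constructor
    · rintro ((hx | ⟨he, hc, rfl⟩) | ⟨g, hg, hP⟩)
      exacts [Or.inl hx, Or.inr ⟨h, Or.inl rfl, he, hc, rfl⟩, Or.inr ⟨g, Or.inr hg, hP⟩]
    · rintro (hx | ⟨g, (rfl | hg), hP⟩)
      exacts [Or.inl (Or.inl hx), Or.inl (Or.inr hP), Or.inr ⟨g, hg, hP⟩]

theorem nodup_foldA (headers rest : List String) (acc : PySem.Set String)
    (hacc : acc.Nodup) : (rest.foldl (pvBodyA headers) acc).Nodup := by
  induction rest generalizing acc with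
  | nil => exact hacc
  | cons h t ih =>
    rw [List.foldl_cons]
    apply ih
    unfold pvBodyA
    split_ifs <;> first | exact PySem.Set.nodup_add _ _ hacc | exact hacc

-- B's loop body, named for the induction
def pvBodyB (d : PySem.Dict String (Bool × Bool)) (h : String) : PySem.Dict String (Bool × Bool) :=
  if PySem.Str.endswith h "_objective" then
    d.insert (PySem.Str.slice h none (some (-10)))
      (true, (d.getD (PySem.Str.slice h none (some (-10))) (false, false)).2)
  else if PySem.Str.endswith h "_process_total_time" then
    d.insert (PySem.Str.slice h none (some (-19)))
      ((d.getD (PySem.Str.slice h none (some (-19))) (false, false)).1, true)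
  else d

-- did `rest` contribute an objective / total-time sighting for name `n`?
def pvObj (rest : List String) (n : String) : Bool :=
  rest.any (fun h => PySem.Str.endswith h "_objective" &&
    (PySem.Str.slice h none (some (-10)) == n))
def pvTot (rest : List String) (n : String) : Bool :=
  rest.any (fun h => !PySem.Str.endswith h "_objective" &&
    PySem.Str.endswith h "_process_total_time" &&
    (PySem.Str.slice h none (some (-19)) == n))

theorem nodup_keys_foldB (rest : List String) (d : PySem.Dict String (Bool × Bool))
    (hd : d.keys.Nodup) : (rest.foldl pvBodyB d).keys.Nodup := by
  induction rest generalizing d with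
  | nil => exact hd
  | cons h t ih =>
    rw [List.foldl_cons]
    apply ih
    unfold pvBodyB
    split_ifs <;> first | exact PySem.Dict.nodup_keys_insert _ _ _ hd | exact hd

-- the dict invariant: getD after the fold = starting flags OR-ed with the sightings in `rest`
theorem getD_foldB (rest : List String) (d : PySem.Dict String (Bool × Bool)) (n : String) :
    (rest.foldl pvBodyB d).getD n (false, false) =
      ((d.getD n (false, false)).1 || pvObj rest n,
       (d.getD n (false, false)).2 || pvTot rest n) := by
  induction rest generalizing d with
  | nil => simp [pvObj, pvTot]
  | cons h t ih =>
    rw [List.foldl_cons, ih]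
    unfold pvBodyB
    have hobj : pvObj (h :: t) n =
        ((PySem.Str.endswith h "_objective" &&
          (PySem.Str.slice h none (some (-10)) == n)) || pvObj t n) := rfl
    have htot : pvTot (h :: t) n =
        ((!PySem.Str.endswith h "_objective" &&
          PySem.Str.endswith h "_process_total_time" &&
          (PySem.Str.slice h none (some (-19)) == n)) || pvTot t n) := rfl
    split_ifs with h1 h2
    · rw [PySem.Dict.getD_insert, hobj, htot, h1]
      by_cases hn : n = PySem.Str.slice h none (some (-10))
      · rw [if_pos hn, hn, beq_self_eq_true]
        simp
      · rw [if_neg hn, beq_eq_false_iff_ne.mpr (Ne.symm hn)]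
        simp
    · have h1f : PySem.Str.endswith h "_objective" = false := by
        simpa using h1
      rw [PySem.Dict.getD_insert, hobj, htot, h1f, h2]
      by_cases hn : n = PySem.Str.slice h none (some (-19))
      · rw [if_pos hn, hn, beq_self_eq_true]
        simp
      · rw [if_neg hn, beq_eq_false_iff_ne.mpr (Ne.symm hn)]
        simp
    · have h1f : PySem.Str.endswith h "_objective" = false := by
        simpa using h1
      have h2f : PySem.Str.endswith h "_process_total_time" = false := by
        simpa using h2
      rw [hobj, htot, h1f, h2f]
      simp

-- membership in B's pre-sort list ↔ both flags true after the fold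
theorem mem_listB (headers : List String) (n : String) :
    n ∈ (((headers.foldl pvBodyB PySem.Dict.empty).items.filter
            (fun nv => nv.2.1 && nv.2.2)).map (fun nv => nv.1)) ↔
      (headers.foldl pvBodyB PySem.Dict.empty).getD n (false, false) = (true, true) := by
  have hnd : (headers.foldl pvBodyB PySem.Dict.empty).keys.Nodup :=
    nodup_keys_foldB headers _ (by simp)
  constructor
  · rintro hm
    obtain ⟨⟨k, v⟩, hkv, rfl⟩ := List.mem_map.mp hm
    have hkv' := List.mem_filter.mp hkv
    have hv : v = (true, true) := by
      have := hkv'.2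
      simp only [Bool.and_eq_true] at this
      obtain ⟨a, b⟩ := v
      simp at this
      simp [this]
    subst hv
    rw [PySem.Dict.getD_of_mem_items _ hkv'.1 hnd]
  · intro hg
    have hget : (headers.foldl pvBodyB PySem.Dict.empty).get? n = some (true, true) := by
      rcases hc : (headers.foldl pvBodyB PySem.Dict.empty).get? n with _ | v
      · rw [PySem.Dict.getD_eq_get?_getD, hc] at hg
        simp at hg
      · rw [PySem.Dict.getD_eq_get?_getD, hc] at hg
        simp at hg
        rw [hg]
    have hmem : (n, (true, true)) ∈ (headers.foldl pvBodyB PySem.Dict.empty).items :=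
      PySem.Dict.mem_items_of_get?_eq_some _ hget
    exact List.mem_map.mpr ⟨(n, (true, true)), List.mem_filter.mpr ⟨hmem, by simp⟩, rfl⟩

theorem nodup_listB (headers : List String) :
    (((headers.foldl pvBodyB PySem.Dict.empty).items.filter
        (fun nv => nv.2.1 && nv.2.2)).map (fun nv => nv.1)).Nodup := by
  have hnd : (headers.foldl pvBodyB PySem.Dict.empty).keys.Nodup :=
    nodup_keys_foldB headers _ (by simp)
  have hsub : (((headers.foldl pvBodyB PySem.Dict.empty).items.filter
        (fun nv => nv.2.1 && nv.2.2)).map (fun nv => nv.1)).Sublist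
      ((headers.foldl pvBodyB PySem.Dict.empty).items.map (fun nv => nv.1)) :=
    List.filter_sublist.map _
  exact hnd.sublist hsub

-- pvTot headers n = (the literal column name is present)
theorem pvTot_iff (headers : List String) (n : String) :
    pvTot headers n = true ↔ (n ++ "_process_total_time") ∈ headers := by
  unfold pvTot
  rw [List.any_eq_true]
  constructor
  · rintro ⟨h, hh, hb⟩
    simp only [Bool.and_eq_true, Bool.not_eq_true', beq_iff_eq] at hb
    obtain ⟨⟨_, he⟩, hs⟩ := hb
    have := eq_strip19_append h he
    rw [hs] at this
    rwa [← this]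
  · intro hm
    refine ⟨n ++ "_process_total_time", hm, ?_⟩
    simp only [Bool.and_eq_true, Bool.not_eq_true', beq_iff_eq]
    exact ⟨⟨not_endswith_obj n, endswith_append n _⟩, strip19_append n⟩

theorem pvObj_iff (headers : List String) (n : String) :
    pvObj headers n = true ↔ ∃ h ∈ headers, PySem.Str.endswith h "_objective" = true ∧
      n = PySem.Str.slice h none (some (-10)) := by
  unfold pvObj
  rw [List.any_eq_true]
  constructor
  · rintro ⟨h, hh, hb⟩
    simp only [Bool.and_eq_true, beq_iff_eq] at hb
    exact ⟨h, hh, hb.1, hb.2.symm⟩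
  · rintro ⟨h, hh, he, rfl⟩
    refine ⟨h, hh, ?_⟩
    rw [Bool.and_eq_true, beq_iff_eq]
    exact ⟨he, rfl⟩

-- the two pre-sort lists have the same members
theorem mem_iff (headers : List String) (x : String) :
    x ∈ headers.foldl (pvBodyA headers) PySem.Set.empty ↔
      x ∈ (((headers.foldl pvBodyB PySem.Dict.empty).items.filter
            (fun nv => nv.2.1 && nv.2.2)).map (fun nv => nv.1)) := by
  rw [mem_foldA, mem_listB, getD_foldB]
  simp only [PySem.Set.empty, List.not_mem_nil, false_or, PySem.Dict.getD_empty,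
    Prod.mk.injEq, Bool.false_or]
  constructor
  · rintro ⟨h, hh, he, hc, rfl⟩
    constructor
    · exact (pvObj_iff headers _).mpr ⟨h, hh, he, rfl⟩
    · exact (pvTot_iff headers _).mpr hc
  · rintro ⟨ho, ht⟩
    obtain ⟨h, hh, he, rfl⟩ := (pvObj_iff headers x).mp ho
    exact ⟨h, hh, he, (pvTot_iff headers _).mp ht, rfl⟩

-- ===== VERDICT (by name: the statement is the Claim_ definition above) =====
theorem discover_solvers_spec : Claim_equal_discover_solvers := by
  intro headers _
  unfold Spec_discover_solvers discover_solvers discover_solvers_alt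
  apply PySem.List.sorted_eq_sorted_of_perm _ _ _ (fun a b h => h)
  rw [List.perm_ext_iff_of_nodup]
  · exact fun x => mem_iff headers x
  · exact nodup_foldA headers headers PySem.Set.empty List.nodup_nil
  · exact nodup_listB headers
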